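-- pv_equiv track=rewrite | github.com/open-mmlab/mmocr | mmocr/datasets/xfund_dataset.py | get_segment_ids
-- ===== SOURCE A (Python) =====
-- def get_segment_ids(boxes):
--     segment_ids = []
--     for i in range(len(boxes)):
--         if i == 0:
--             segment_ids.append(0)
--         else:
--             if boxes[i - 1] == boxes[i]:
--                 segment_ids.append(segment_ids[-1])
--             else:
--                 segment_ids.append(segment_ids[-1] + 1)
--     return segment_ids
-- ===== SOURCE B (Python) =====
-- from itertools import groupby
--
--
-- def get_segment_ids(boxes):
--     return [i for i, (_, g) in enumerate(groupby(boxes)) for _ in g]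
-- ===== Notes on version B (the rewrite author's own statement) =====
-- stated objective: idiomatic
-- what changed: Replaces the per-element last-id lookup loop with itertools.groupby: partition boxes into maximal runs of adjacent-equal boxes and emit the run index once per element.
import Mathlib
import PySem

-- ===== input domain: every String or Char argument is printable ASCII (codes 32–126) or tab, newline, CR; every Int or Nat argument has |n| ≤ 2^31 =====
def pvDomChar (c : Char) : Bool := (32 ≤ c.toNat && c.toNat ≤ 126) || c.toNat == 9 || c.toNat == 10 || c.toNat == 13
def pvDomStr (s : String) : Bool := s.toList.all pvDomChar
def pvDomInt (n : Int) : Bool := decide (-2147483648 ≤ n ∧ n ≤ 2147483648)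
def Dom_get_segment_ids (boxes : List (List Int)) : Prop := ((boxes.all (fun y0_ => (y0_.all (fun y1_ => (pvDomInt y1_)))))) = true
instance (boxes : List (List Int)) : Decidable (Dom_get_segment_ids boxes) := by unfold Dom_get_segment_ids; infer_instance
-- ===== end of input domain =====

-- B replaces A's per-element last-id lookup with an itertools.groupby-style
-- group-then-expand traversal (idiomatic; same cost).

-- ===== PORT A =====
-- loop body of A (the for-loop over range(len(boxes)))
def Astep (boxes : List (List Int)) (segment_ids : List Int) (i : Int) : List Int :=
  if i == 0 then segment_ids ++ [0]
  else if PySem.List.pyGet? boxes (i - 1) == PySem.List.pyGet? boxes i then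
    segment_ids ++ [PySem.List.pyGetD segment_ids (-1) 0]
  else
    segment_ids ++ [PySem.List.pyGetD segment_ids (-1) 0 + 1]

def get_segment_ids (boxes : List (List Int)) : List Int :=
  (PySem.List.pyRange 0 (boxes.length : Int) 1).foldl (Astep boxes) []

-- ===== PORT B =====
-- itertools.groupby (identity key): forward pass, extend the current (last)
-- group while the incoming element equals the group's most recent element.
def pyGroupby (boxes : List (List Int)) : List (List (List Int)) :=
  boxes.foldl (fun gs x =>
    match gs.getLast? with
    | none => [[x]]
    | some g => if g.getLast? == some x then gs.dropLast ++ [g ++ [x]] else gs ++ [[x]]) []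

-- [i for i, (_, g) in enumerate(groupby(boxes)) for _ in g]
def get_segment_ids_alt (boxes : List (List Int)) : List Int :=
  ((pyGroupby boxes).zipIdx).flatMap (fun gi => gi.1.map (fun _ => (gi.2 : Int)))

-- ===== PRECONDITION & SPEC =====
def Spec_get_segment_ids (boxes : List (List Int)) (out : List Int) : Prop := out = get_segment_ids_alt boxes
instance (boxes : List (List Int)) (out : List Int) : Decidable (Spec_get_segment_ids boxes out) := by unfold Spec_get_segment_ids; infer_instance

-- ===== CLAIM (what is proved, stated in full; the proofs are below) =====
def Claim_equal_get_segment_ids : Prop := ∀ (boxes : List (List Int)), Dom_get_segment_ids boxes → Spec_get_segment_ids boxes (get_segment_ids boxes)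

-- ===== LEMMAS AND PROOFS =====

-- A's loop, one snoc step: appending a box appends one id.
theorem A_snoc (l : List (List Int)) (x : List Int) :
    get_segment_ids (l ++ [x]) =
      if l = [] then [0]
      else if l.getLast? == some x then
        get_segment_ids l ++ [PySem.List.pyGetD (get_segment_ids l) (-1) 0]
      else
        get_segment_ids l ++ [PySem.List.pyGetD (get_segment_ids l) (-1) 0 + 1] := by
  unfold get_segment_ids
  have hlen : ((l ++ [x]).length : Int) = (l.length : Int) + 1 := by simp
  rw [hlen, PySem.List.pyRange_one_succ_right (by positivity), List.foldl_append]
  have hcongr :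
      (PySem.List.pyRange 0 (l.length : Int) 1).foldl (Astep (l ++ [x])) [] =
      (PySem.List.pyRange 0 (l.length : Int) 1).foldl (Astep l) [] := by
    apply PySem.List.foldl_congr_mem
    intro acc i hi
    rw [PySem.List.mem_pyRange_one] at hi
    by_cases h0 : i = 0
    · simp [Astep, h0]
    · have e1 : PySem.List.pyGet? (l ++ [x]) (i - 1) = PySem.List.pyGet? l (i - 1) := by
        rw [PySem.List.pyGet?_of_nonneg _ (by omega), PySem.List.pyGet?_of_nonneg _ (by omega)]
        rw [List.getElem?_append_left (by omega)]
      have e2 : PySem.List.pyGet? (l ++ [x]) i = PySem.List.pyGet? l i := by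
        rw [PySem.List.pyGet?_of_nonneg _ (by omega), PySem.List.pyGet?_of_nonneg _ (by omega)]
        rw [List.getElem?_append_left (by omega)]
      simp [Astep, h0, e1, e2]
  rw [hcongr]
  by_cases hl : l = []
  · subst hl; simp [Astep, PySem.List.pyRange_one_eq_nil]
  · have hn : 0 < l.length := List.length_pos_iff.mpr hl
    have hne0 : (((l.length : Int) == 0)) = false := by simp; omega
    have eA : PySem.List.pyGet? (l ++ [x]) ((l.length : Int) - 1) = l.getLast? := by
      rw [PySem.List.pyGet?_of_nonneg _ (by omega)]
      rw [List.getElem?_append_left (by omega)]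
      rw [List.getLast?_eq_getElem?]
      congr 1
      omega
    have eB : PySem.List.pyGet? (l ++ [x]) (l.length : Int) = some x := by
      simp
    rw [if_neg hl]
    simp only [List.foldl_cons, List.foldl_nil, Astep, hne0, Bool.false_eq_true, if_false, eA, eB]

-- B's groups, one snoc step (foldl unrolls at the end).
theorem G_snoc (l : List (List Int)) (x : List Int) :
    pyGroupby (l ++ [x]) =
      match (pyGroupby l).getLast? with
      | none => [[x]]
      | some g => if g.getLast? == some x then (pyGroupby l).dropLast ++ [g ++ [x]]
                  else pyGroupby l ++ [[x]] := by
  unfold pyGroupby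
  rw [List.foldl_append]
  rfl

-- flatMap over zipIdx, one snoc group.
theorem F_snoc (gs : List (List (List Int))) (g : List (List Int)) (n : Nat) :
    ((gs ++ [g]).zipIdx n).flatMap (fun gi => gi.1.map (fun _ => (gi.2 : Int))) =
      (gs.zipIdx n).flatMap (fun gi => gi.1.map (fun _ => (gi.2 : Int)))
        ++ g.map (fun _ => ((n + gs.length : Nat) : Int)) := by
  rw [List.zipIdx_append]
  simp

-- the combined invariant, by reverse induction
theorem main_inv (l : List (List Int)) :
    get_segment_ids l = get_segment_ids_alt l
    ∧ ((pyGroupby l).getLast?.bind (fun g => g.getLast?)) = l.getLast?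
    ∧ (l ≠ [] → PySem.List.pyGetD (get_segment_ids l) (-1) 0 = ((pyGroupby l).length : Int) - 1
                 ∧ get_segment_ids l ≠ [] ∧ pyGroupby l ≠ []) := by
  induction l using List.reverseRecOn with
  | nil =>
    refine ⟨?_, ?_, by simp⟩
    · simp [get_segment_ids, get_segment_ids_alt, pyGroupby, PySem.List.pyRange_one_eq_nil]
    · simp [pyGroupby]
  | append_singleton l x ih =>
    obtain ⟨hab, hlast, hrest⟩ := ih
    by_cases hl : l = []
    · subst hl
      have hA : get_segment_ids [x] = [0] := by simpa using A_snoc [] x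
      refine ⟨?_, ?_, ?_⟩ <;>
        simp [hA, get_segment_ids_alt, pyGroupby, List.zipIdx, PySem.List.pyGetD,
          PySem.List.pyGet?, PySem.List.pyIdx?]
    · obtain ⟨hd, hseg, hgs⟩ := hrest hl
      obtain ⟨g, hg⟩ := Option.isSome_iff_exists.mp (List.getLast?_isSome.mpr hgs)
      have hgl : g.getLast? = l.getLast? := by
        rw [hg] at hlast; simpa using hlast
      have hsplit : pyGroupby l = (pyGroupby l).dropLast ++ [g] := by
        conv_lhs => rw [← List.dropLast_append_getLast? g hg]
      have hlen : (pyGroupby l).length = (pyGroupby l).dropLast.length + 1 := by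
        conv_lhs => rw [hsplit]
        simp
      have hGs : pyGroupby (l ++ [x]) =
          if g.getLast? == some x then (pyGroupby l).dropLast ++ [g ++ [x]]
          else pyGroupby l ++ [[x]] := by
        rw [G_snoc, hg]
      have hAs := A_snoc l x
      rw [if_neg hl] at hAs
      by_cases heq : l.getLast? = some x
      · have hcond : (g.getLast? == some x) = true := by rw [hgl]; simpa using heq
        have hcondA : (l.getLast? == some x) = true := by simpa using heq
        rw [hcondA, if_pos rfl] at hAs
        rw [hcond, if_pos rfl] at hGs
        refine ⟨?_, ?_, ?_⟩
        · rw [hAs, hd, hab]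
          conv_rhs => rw [get_segment_ids_alt, hGs]
          conv_lhs => rw [get_segment_ids_alt, hsplit]
          rw [F_snoc, F_snoc]
          simp only [List.map_append, List.map_cons, List.map_nil, List.append_assoc,
            List.append_cancel_left_eq, List.cons.injEq, and_true]
          simp only [List.length_append, List.length_cons, List.length_nil, Nat.zero_add]
          push_cast
          omega
        · rw [hGs]; simp
        · intro _
          refine ⟨?_, by simp [hAs, hseg], by simp [hGs]⟩
          rw [hAs, PySem.List.pyGetD_neg_one_append_singleton, hGs, hd, hlen]
          simp
      · have hcond : (g.getLast? == some x) = false := by rw [hgl]; simpa using heq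
        have hcondA : (l.getLast? == some x) = false := by simpa using heq
        rw [hcondA] at hAs
        simp only [Bool.false_eq_true, if_false] at hAs
        rw [hcond] at hGs
        simp only [Bool.false_eq_true, if_false] at hGs
        refine ⟨?_, ?_, ?_⟩
        · rw [hAs, hd, hab]
          conv_rhs => rw [get_segment_ids_alt, hGs]
          rw [F_snoc]
          conv_lhs => rw [get_segment_ids_alt]
          simp only [List.map_cons, List.map_nil, List.append_cancel_left_eq, List.cons.injEq, and_true]
          push_cast
          omega
        · rw [hGs]; simp
        · intro _
          refine ⟨?_, by simp [hAs, hseg], by simp [hGs]⟩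
          rw [hAs, PySem.List.pyGetD_neg_one_append_singleton, hGs, hd]
          simp

-- ===== VERDICT (by name: the statement is the Claim_ definition above) =====
theorem get_segment_ids_spec : Claim_equal_get_segment_ids := by
  intro boxes _
  exact (main_inv boxes).1
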